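-- pv_equiv track=rewrite | github.com/Shakleen/Kaggle-Automated-Essay-Scoring | lib/data_tools/word_feature_engineering.py | consonent_score
-- ===== SOURCE A (Python) =====
-- def consonent_score(word):
--     """Assigns difficulty score based on the number of consequent consonents."""
--     max_score = score = 0
--
--     for letter in word:
--         if letter in "aeiou":
--             score += 1
--             max_score = max(score, max_score)
--         else:
--             score = 0
--
--     return max_score
-- ===== SOURCE B (Python) =====
-- def consonent_score(word):
--     """Assigns difficulty score based on the number of consequent consonents."""
--     best = 0
--     i = 0
--     n = len(word)
--     while i < n:
--         if word[i] in "aeiou":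
--             # measure the whole maximal vowel run starting at i, then jump past it
--             j = i + 1
--             while j < n and word[j] in "aeiou":
--                 j += 1
--             if j - i > best:
--                 best = j - i
--             i = j
--         else:
--             i += 1
--     return best
-- ===== Notes on version B (the rewrite author's own statement) =====
-- stated objective: alternative
-- what changed: B scans the string run by run: when it meets a vowel it measures the whole maximal vowel run at once and jumps past it, keeping only the best run length, instead of A's per-letter running counter with a max update at every vowel.
import Mathlib
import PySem

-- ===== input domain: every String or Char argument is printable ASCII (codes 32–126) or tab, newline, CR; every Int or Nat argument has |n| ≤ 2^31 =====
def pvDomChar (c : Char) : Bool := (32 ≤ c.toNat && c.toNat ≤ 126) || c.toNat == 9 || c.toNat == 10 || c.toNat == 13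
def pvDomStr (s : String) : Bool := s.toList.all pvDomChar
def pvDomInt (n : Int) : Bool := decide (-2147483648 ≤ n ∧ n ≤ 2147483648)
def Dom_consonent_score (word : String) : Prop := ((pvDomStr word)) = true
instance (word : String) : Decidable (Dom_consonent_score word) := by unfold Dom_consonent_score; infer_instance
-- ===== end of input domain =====

-- B runs over the string run by run (measure each maximal vowel run, jump past it)
-- instead of A's per-letter running counter; alternative decomposition, same cost.

-- `letter in "aeiou"` (used, verbatim, by both Python versions)
def pvIsVowel (c : Char) : Bool := "aeiou".toList.contains c

-- ===== PORT A =====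
-- for letter in word: if vowel: score += 1; max_score = max(score, max_score) else score = 0
def consonent_score (word : String) : Int :=
  (word.toList.foldl
    (fun (st : Int × Int) letter =>
      if pvIsVowel letter then
        (max (st.2 + 1) (st.1), st.2 + 1)
      else
        (st.1, 0))
    (0, 0)).1

-- ===== PORT B =====
-- inner while loop of Source B: length of the maximal vowel run at the current position
def pvRunLen : List Char → Nat
  | [] => 0
  | c :: rest => if pvIsVowel c then pvRunLen rest + 1 else 0

theorem pvRunLen_pos_of_vowel (c : Char) (rest : List Char) (h : pvIsVowel c = true) :
    0 < pvRunLen (c :: rest) := by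
  simp [pvRunLen, h]

-- outer while loop of Source B over the remaining suffix; `best` is the accumulator
def pvScan (l : List Char) (best : Int) : Int :=
  match l with
  | [] => best
  | c :: rest =>
    if hv : pvIsVowel c = true then
      let k := pvRunLen (c :: rest)
      pvScan (List.drop k (c :: rest)) (max best (k : Int))
    else
      pvScan rest best
termination_by l.length
decreasing_by
  · have := pvRunLen_pos_of_vowel c rest hv
    simp [List.length_drop]
    omega
  · simp

def consonent_score_alt (word : String) : Int := pvScan word.toList 0

-- ===== PRECONDITION & SPEC =====
def Spec_consonent_score (word : String) (out : Int) : Prop := out = consonent_score_alt word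
instance (word : String) (out : Int) : Decidable (Spec_consonent_score word out) := by unfold Spec_consonent_score; infer_instance

-- ===== CLAIM (what is proved, stated in full; the proofs are below) =====
def Claim_equal_consonent_score : Prop := ∀ (word : String), Dom_consonent_score word → Spec_consonent_score word (consonent_score word)

-- ===== LEMMAS AND PROOFS =====

-- proof-side characterisation: best score reachable in l with a running count s carried in
def pvC : List Char → Int → Int
  | [], _ => 0
  | c :: rest, s => if pvIsVowel c then max (s + 1) (pvC rest (s + 1)) else pvC rest 0

theorem pvC_carry_irrel (l : List Char) (s : Int) (h : pvRunLen l = 0) :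
    pvC l s = pvC l 0 := by
  cases l with
  | nil => rfl
  | cons c rest =>
    by_cases hv : pvIsVowel c = true
    · simp [pvRunLen, hv] at h
    · simp [pvC, hv]

-- A's fold computes max of the incoming best with pvC
theorem foldA_eq (l : List Char) : ∀ (m s : Int), 0 ≤ m →
    (l.foldl
      (fun (st : Int × Int) letter =>
        if pvIsVowel letter then
          (max (st.2 + 1) (st.1), st.2 + 1)
        else
          (st.1, 0))
      (m, s)).1 = max m (pvC l s) := by
  induction l with
  | nil =>
    intro m s hm
    simp [pvC]
    omega
  | cons c rest ih =>
    intro m s hm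
    by_cases hv : pvIsVowel c = true
    · simp only [List.foldl_cons, hv, if_pos]
      rw [ih (max (s + 1) m) (s + 1) (le_trans hm (le_max_right _ _))]
      simp [pvC, hv]
      exact max_left_comm _ _ _
    · simp only [List.foldl_cons, hv, Bool.false_eq_true, if_false]
      rw [ih m 0 hm]
      simp [pvC, hv]

-- pvC splits off the leading vowel run
theorem pvC_run (l : List Char) : ∀ (s : Int), 0 ≤ s → 0 < pvRunLen l →
    pvC l s = max (s + (pvRunLen l : Int)) (pvC (List.drop (pvRunLen l) l) 0) := by
  induction l with
  | nil => intro s _ h; simp [pvRunLen] at h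
  | cons c rest ih =>
    intro s hs _
    by_cases hv : pvIsVowel c = true
    · have hrl : pvRunLen (c :: rest) = pvRunLen rest + 1 := by simp [pvRunLen, hv]
      by_cases hr : 0 < pvRunLen rest
      · have := ih (s + 1) (by omega) hr
        simp only [pvC, hv, if_pos, this, hrl, List.drop_succ_cons]
        have hcast : (s + 1) + (pvRunLen rest : Int) = s + ((pvRunLen rest + 1 : Nat) : Int) := by
          push_cast; ring
        rw [hcast]
        rw [max_left_comm, ← max_assoc, max_eq_left (by push_cast; omega :
          (s + 1 : Int) ≤ s + ((pvRunLen rest + 1 : Nat) : Int))]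
      · have hr0 : pvRunLen rest = 0 := by omega
        simp only [pvC, hv, if_pos, hrl, hr0, List.drop_succ_cons, List.drop_zero]
        rw [pvC_carry_irrel rest (s + 1) hr0]
        push_cast; ring_nf
    · have : pvRunLen (c :: rest) = 0 := by simp [pvRunLen, hv]
      omega

-- B's scan computes the same quantity
theorem pvScan_eq (l : List Char) (best : Int) (hb : 0 ≤ best) :
    pvScan l best = max best (pvC l 0) := by
  match l with
  | [] => simp [pvScan, pvC]; omega
  | c :: rest =>
    by_cases hv : pvIsVowel c = true
    · have hk : 0 < pvRunLen (c :: rest) := pvRunLen_pos_of_vowel c rest hv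
      rw [pvScan]
      simp only [hv, dif_pos]
      rw [pvScan_eq (List.drop (pvRunLen (c :: rest)) (c :: rest)) _
        (le_trans hb (le_max_left _ _))]
      rw [pvC_run (c :: rest) 0 le_rfl hk]
      rw [max_assoc]
      norm_num
    · rw [pvScan]
      simp only [hv]
      rw [pvScan_eq rest best hb]
      simp [pvC, hv]
termination_by l.length
decreasing_by
  · have := pvRunLen_pos_of_vowel c rest hv
    simp [List.length_drop]
    omega
  · simp

-- ===== VERDICT (by name: the statement is the Claim_ definition above) =====
theorem consonent_score_spec : Claim_equal_consonent_score := by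
  intro word _
  unfold Spec_consonent_score consonent_score consonent_score_alt
  rw [foldA_eq word.toList 0 0 le_rfl, pvScan_eq word.toList 0 le_rfl]
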